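-- pv_equiv track=rewrite | github.com/Subhajit-git07/Leetcode | leetcode_practice5.py | partitionLevels
-- ===== SOURCE A (Python) =====
-- def partitionLevels(s):
--     dictS = {}
--     for i in range(len(s)):
--         dictS[s[i]] = i
--     start = 0
--     res = []
--     output = []
--     end = 0
--
--     for i in range(len(s)):
--         end = max(end, dictS[s[i]])
--         if i == end:
--             res.append(i-start+1)
--             output.append(s[start:i+1])
--             start = i + 1
--     return output
-- ===== SOURCE B (Python) =====
-- def partitionLevels(s):
--     first = {}
--     last = {}
--     for i, c in enumerate(s):
--         if c not in first:
--             first[c] = i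
--         last[c] = i
--     intervals = [(first[c], last[c]) for c in first]
--     cuts = [i for i in range(len(s)) if all(hi <= i for lo, hi in intervals if lo <= i)]
--     return [s[lo:hi + 1] for lo, hi in zip([0] + [c + 1 for c in cuts], cuts)]
-- ===== Notes on version B (the rewrite author's own statement) =====
-- stated objective: alternative
-- what changed: Instead of the single greedy pass maintaining a running max-end and start pointer, B builds per-character [first,last] occurrence intervals and declares position i a cut point exactly when every interval starting at or before i also ends by i, then slices the string between consecutive cut points.
import Mathlib
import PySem

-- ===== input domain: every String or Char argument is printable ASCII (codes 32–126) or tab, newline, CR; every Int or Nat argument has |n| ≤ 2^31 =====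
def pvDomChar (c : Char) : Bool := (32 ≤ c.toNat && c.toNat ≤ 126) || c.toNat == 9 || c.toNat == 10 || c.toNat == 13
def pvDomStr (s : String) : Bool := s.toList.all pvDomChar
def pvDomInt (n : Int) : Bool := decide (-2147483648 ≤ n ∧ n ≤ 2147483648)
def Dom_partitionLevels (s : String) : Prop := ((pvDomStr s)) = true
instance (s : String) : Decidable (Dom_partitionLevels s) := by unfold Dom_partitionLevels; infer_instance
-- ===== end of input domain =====

-- B builds per-character [first,last] intervals and cuts where no open interval extends past i,
-- instead of A's greedy running-max pass: alternative decomposition, same results (proved below).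

-- ===== PORT A =====
-- A's loop body, kept as a named helper so the proofs can speak about one step.
def pvBodyA (s : String) (dictS : PySem.Dict Char Int)
    (acc : Int × List Int × List String × Int) (i : Int) : Int × List Int × List String × Int :=
  let e := max acc.2.2.2 (dictS.getD ((PySem.Str.pyGet? s i).getD ' ') 0)
  -- dictS[s[i]]: the key is always present (s[i] was inserted), so getD is exact here
  if i == e then
    (i + 1, acc.2.1 ++ [i - acc.1 + 1],
     acc.2.2.1 ++ [PySem.Str.slice s (some acc.1) (some (i + 1))], e)
  else (acc.1, acc.2.1, acc.2.2.1, e)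

def partitionLevels (s : String) : List String :=
  let dictS : PySem.Dict Char Int :=
    (PySem.List.pyRange 0 (PySem.Str.len s) 1).foldl
      (fun d i => d.insert ((PySem.Str.pyGet? s i).getD ' ') i) PySem.Dict.empty
  let final :=
    (PySem.List.pyRange 0 (PySem.Str.len s) 1).foldl (pvBodyA s dictS) (0, ([], ([], 0)))
  final.2.2.1

-- ===== PORT B =====
-- B's single first/last building loop, as a named helper.
def pvStepB (fd : PySem.Dict Char Int × PySem.Dict Char Int) (p : Int × Char) :
    PySem.Dict Char Int × PySem.Dict Char Int :=
  ((if fd.1.contains p.2 then fd.1 else fd.1.insert p.2 p.1), fd.2.insert p.2 p.1)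

def partitionLevels_alt (s : String) : List String :=
  let fl := (PySem.List.enumerate s.toList 0).foldl pvStepB (PySem.Dict.empty, PySem.Dict.empty)
  -- last[c] with c a key of first: c is then also a key of last, so getD is exact here
  let intervals : List (Int × Int) := fl.1.keys.map (fun c => (fl.1.getD c 0, fl.2.getD c 0))
  let cuts : List Int :=
    (PySem.List.pyRange 0 (PySem.Str.len s) 1).filter
      (fun i => intervals.all (fun p => !(decide (p.1 ≤ i)) || decide (p.2 ≤ i)))
  (List.zip ((0 : Int) :: cuts.map (· + 1)) cuts).map
    (fun p => PySem.Str.slice s (some p.1) (some (p.2 + 1)))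

-- ===== PRECONDITION & SPEC =====
def Spec_partitionLevels (s : String) (out : List String) : Prop := out = partitionLevels_alt s
instance (s : String) (out : List String) : Decidable (Spec_partitionLevels s out) := by unfold Spec_partitionLevels; infer_instance

-- ===== CLAIM (what is proved, stated in full; the proofs are below) =====
def Claim_equal_partitionLevels : Prop := ∀ (s : String), Dom_partitionLevels s → Spec_partitionLevels s (partitionLevels s)

-- ===== LEMMAS AND PROOFS =====


-- Proof-side helpers: the two components of B's pair fold, and B's output builder.
def pvIns (d : PySem.Dict Char Int) (p : Int × Char) : PySem.Dict Char Int := d.insert p.2 p.1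

def pvFst (d : PySem.Dict Char Int) (p : Int × Char) : PySem.Dict Char Int :=
  if d.contains p.2 then d else d.insert p.2 p.1

def pvLastF (l : List Char) (s0 : Int) (d : PySem.Dict Char Int) : PySem.Dict Char Int :=
  (PySem.List.enumerate l s0).foldl pvIns d

def pvFirstF (l : List Char) (s0 : Int) (d : PySem.Dict Char Int) : PySem.Dict Char Int :=
  (PySem.List.enumerate l s0).foldl pvFst d

def pvEmit (st : String) (start : Int) (cuts : List Int) : List String :=
  (List.zip (start :: cuts.map (· + 1)) cuts).map
    (fun p => PySem.Str.slice st (some p.1) (some (p.2 + 1)))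

theorem pvEmit_nil (st : String) (start : Int) : pvEmit st start [] = [] := rfl

theorem pvEmit_cons (st : String) (start c : Int) (cs : List Int) :
    pvEmit st start (c :: cs) =
      PySem.Str.slice st (some start) (some (c + 1)) :: pvEmit st (c + 1) cs := rfl

theorem pvStepB_split (ps : List (Int × Char)) (F L : PySem.Dict Char Int) :
    ps.foldl pvStepB (F, L) = (ps.foldl pvFst F, ps.foldl pvIns L) := by
  induction ps generalizing F L with
  | nil => rfl
  | cons p t ih => simp only [List.foldl_cons, pvStepB, pvFst, pvIns] at *; exact ih _ _

theorem pvLastF_cons (x : Char) (t : List Char) (s0 : Int) (d : PySem.Dict Char Int) :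
    pvLastF (x :: t) s0 d = pvLastF t (s0 + 1) (d.insert x s0) := by
  simp [pvLastF, PySem.List.enumerate_cons, pvIns]

theorem pvFirstF_cons (x : Char) (t : List Char) (s0 : Int) (d : PySem.Dict Char Int) :
    pvFirstF (x :: t) s0 d = pvFirstF t (s0 + 1) (if d.contains x then d else d.insert x s0) := by
  simp [pvFirstF, PySem.List.enumerate_cons, pvFst]

-- last[c] after the fold: untouched, or set to s0 + j for an occurrence j of c
theorem pvLastF_cases (l : List Char) : ∀ (s0 : Int) (d : PySem.Dict Char Int) (c : Char),
    (pvLastF l s0 d).getD c 0 = d.getD c 0 ∨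
      ∃ j : Nat, j < l.length ∧ l.getD j ' ' = c ∧ (pvLastF l s0 d).getD c 0 = s0 + j := by
  induction l with
  | nil => intro s0 d c; left; rfl
  | cons x t ih =>
    intro s0 d c
    rw [pvLastF_cons]
    rcases ih (s0 + 1) (d.insert x s0) c with h | ⟨j, hj, hjc, hv⟩
    · rw [PySem.Dict.getD_insert] at h
      by_cases hcx : c = x
      · right; exact ⟨0, by simp, by simpa using hcx.symm, by simpa [hcx] using h⟩
      · left; simpa [hcx] using h
    · right
      exact ⟨j + 1, by simpa using hj, by simpa using hjc, by rw [hv]; push_cast; ring⟩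

-- every position's character maps to at least that position in the last-occurrence dict
theorem pvLastF_ge (l : List Char) : ∀ (s0 : Int) (d : PySem.Dict Char Int) (k : Nat),
    k < l.length → s0 + k ≤ (pvLastF l s0 d).getD (l.getD k ' ') 0 := by
  induction l with
  | nil => intro _ _ k h; simp at h
  | cons x t ih =>
    intro s0 d k hk
    rw [pvLastF_cons]
    cases k with
    | zero =>
      rcases pvLastF_cases t (s0 + 1) (d.insert x s0) x with h | ⟨j, _, _, hv⟩
      · simp only [List.getD_cons_zero]
        rw [h, PySem.Dict.getD_insert_self]; simp
      · simp only [List.getD_cons_zero]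
        rw [hv]; omega
    | succ k =>
      have := ih (s0 + 1) (d.insert x s0) k (by simpa using hk)
      simp only [List.getD_cons_succ]
      push_cast at this ⊢; omega


-- keys already present are never touched by the first-occurrence fold
theorem pvFirstF_pers (l : List Char) : ∀ (s0 : Int) (d : PySem.Dict Char Int) (c : Char),
    d.contains c = true →
    (pvFirstF l s0 d).contains c = true ∧ (pvFirstF l s0 d).getD c 0 = d.getD c 0 := by
  induction l with
  | nil => intro _ _ _ h; exact ⟨h, rfl⟩
  | cons x t ih =>
    intro s0 d c hc
    rw [pvFirstF_cons]
    by_cases hx : d.contains x = true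
    · simpa [hx] using ih (s0 + 1) d c hc
    · have hcx : c ≠ x := fun h => hx (h ▸ hc)
      have h1 : (d.insert x s0).contains c = true := by
        rw [PySem.Dict.contains_insert]; simp [hc]
      have := ih (s0 + 1) (d.insert x s0) c h1
      rw [Bool.not_eq_true] at hx
      simp only [hx, Bool.false_eq_true, if_false] at *
      exact ⟨this.1, by rw [this.2, PySem.Dict.getD_insert_of_ne _ _ _ hcx]⟩

-- every position's character is a key of `first`, with value at most the position
theorem pvFirstF_le (l : List Char) : ∀ (s0 : Int) (d : PySem.Dict Char Int),
    (∀ c, d.contains c = true → d.getD c 0 ≤ s0) → ∀ k : Nat, k < l.length →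
    (pvFirstF l s0 d).contains (l.getD k ' ') = true ∧
      (pvFirstF l s0 d).getD (l.getD k ' ') 0 ≤ s0 + k := by
  induction l with
  | nil => intro _ _ _ k h; simp at h
  | cons x t ih =>
    intro s0 d hd k hk
    rw [pvFirstF_cons]
    have hd' : ∀ c, (if d.contains x then d else d.insert x s0).contains c = true →
        (if d.contains x then d else d.insert x s0).getD c 0 ≤ s0 + 1 := by
      intro c hc
      by_cases hx : d.contains x = true
      · simp only [hx, if_true] at hc ⊢; have := hd c hc; omega
      · rw [Bool.not_eq_true] at hx
        simp only [hx, Bool.false_eq_true, if_false] at hc ⊢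
        by_cases hcx : c = x
        · subst hcx; rw [PySem.Dict.getD_insert_self]; omega
        · rw [PySem.Dict.getD_insert_of_ne _ _ _ hcx]
          rw [PySem.Dict.contains_insert] at hc
          simp [hcx] at hc
          have := hd c hc; omega
    cases k with
    | zero =>
      have hcont : (if d.contains x then d else d.insert x s0).contains x = true := by
        by_cases hx : d.contains x = true
        · simp [hx]
        · simp [hx, PySem.Dict.contains_insert_self]
      have hval : (if d.contains x then d else d.insert x s0).getD x 0 ≤ s0 := by
        by_cases hx : d.contains x = true
        · simp only [hx, if_true]; exact hd x hx
        · simp [hx, PySem.Dict.getD_insert_self]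
      have := pvFirstF_pers t (s0 + 1) _ x hcont
      simp only [List.getD_cons_zero]
      exact ⟨this.1, by rw [this.2]; simpa using hval⟩
    | succ k =>
      have := ih (s0 + 1) _ hd' k (by simpa using hk)
      simp only [List.getD_cons_succ]
      refine ⟨this.1, ?_⟩
      have h2 := this.2
      push_cast at h2 ⊢; omega

-- every key of `first` is witnessed by an occurrence whose index is its stored value
theorem pvFirstF_wit (l : List Char) : ∀ (s0 : Int) (d : PySem.Dict Char Int) (c : Char),
    (pvFirstF l s0 d).contains c = true →
    (d.contains c = true ∧ (pvFirstF l s0 d).getD c 0 = d.getD c 0) ∨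
      ∃ j : Nat, j < l.length ∧ l.getD j ' ' = c ∧ (pvFirstF l s0 d).getD c 0 = s0 + j := by
  induction l with
  | nil => intro _ _ _ h; exact Or.inl ⟨h, rfl⟩
  | cons x t ih =>
    intro s0 d c hc
    rw [pvFirstF_cons] at hc ⊢
    by_cases hx : d.contains x = true
    · simp only [hx, if_true] at hc ⊢
      rcases ih (s0 + 1) d c hc with h | ⟨j, hj, hjc, hv⟩
      · exact Or.inl h
      · exact Or.inr ⟨j + 1, by simpa using hj, by simpa using hjc,
          by rw [hv]; push_cast; ring⟩
    · rw [Bool.not_eq_true] at hx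
      simp only [hx, Bool.false_eq_true, if_false] at hc ⊢
      rcases ih (s0 + 1) (d.insert x s0) c hc with ⟨h1, h2⟩ | ⟨j, hj, hjc, hv⟩
      · by_cases hcx : c = x
        · subst hcx
          refine Or.inr ⟨0, by simp, by simp, ?_⟩
          rw [h2, PySem.Dict.getD_insert_self]; simp
        · rw [PySem.Dict.contains_insert] at h1
          simp [hcx] at h1
          exact Or.inl ⟨h1, by rw [h2, PySem.Dict.getD_insert_of_ne _ _ _ hcx]⟩
      · exact Or.inr ⟨j + 1, by simpa using hj, by simpa using hjc,
          by rw [hv]; push_cast; ring⟩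


-- A's dict is exactly B's last-occurrence dict
theorem pvDictA_eq (s : String) :
    (PySem.List.pyRange 0 (PySem.Str.len s) 1).foldl
        (fun d i => d.insert ((PySem.Str.pyGet? s i).getD ' ') i) PySem.Dict.empty
      = pvLastF s.toList 0 PySem.Dict.empty := by
  rw [pvLastF, PySem.List.enumerate_eq_map_pyRange s.toList ' ', List.foldl_map]
  simp [pvIns, PySem.List.pyGetD, PySem.Str.len_eq, PySem.List.len]

-- B's interval test at i says exactly: every position up to i has its last occurrence by i
theorem pvCond_iff (l : List Char) (i : Nat) (hi : i < l.length) :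
    (((pvFirstF l 0 PySem.Dict.empty).keys.map
        (fun c => ((pvFirstF l 0 PySem.Dict.empty).getD c 0,
                   (pvLastF l 0 PySem.Dict.empty).getD c 0))).all
      (fun p => !(decide (p.1 ≤ (i : Int))) || decide (p.2 ≤ (i : Int))) = true)
    ↔ ∀ k : Nat, k ≤ i → (pvLastF l 0 PySem.Dict.empty).getD (l.getD k ' ') 0 ≤ (i : Int) := by
  rw [List.all_eq_true]
  constructor
  · intro h k hk
    have hk' : k < l.length := lt_of_le_of_lt hk hi
    have hf := pvFirstF_le l 0 PySem.Dict.empty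
      (by intro c hc; rw [PySem.Dict.contains_empty] at hc; cases hc) k hk'
    have hmem : l.getD k ' ' ∈ (pvFirstF l 0 PySem.Dict.empty).keys :=
      (PySem.Dict.contains_iff_mem_keys _ _).1 hf.1
    have h2 := h _ (List.mem_map_of_mem hmem)
    simp only [Bool.or_eq_true, Bool.not_eq_true', decide_eq_false_iff_not, decide_eq_true_eq] at h2
    rcases h2 with h2 | h2
    · exact absurd (le_trans hf.2 (by omega)) h2
    · exact h2
  · intro h p hp
    rcases List.mem_map.1 hp with ⟨c, hck, rfl⟩
    have hcont := (PySem.Dict.contains_iff_mem_keys _ _).2 hck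
    rcases pvFirstF_wit l 0 PySem.Dict.empty c hcont with ⟨h1, _⟩ | ⟨j, hj, hjc, hv⟩
    · rw [PySem.Dict.contains_empty] at h1; cases h1
    · simp only [Bool.or_eq_true, Bool.not_eq_true', decide_eq_false_iff_not, decide_eq_true_eq]
      by_cases hle : (pvFirstF l 0 PySem.Dict.empty).getD c 0 ≤ (i : Int)
      · right
        rw [hv] at hle
        have hji : j ≤ i := by exact_mod_cast (by omega : (j : Int) ≤ i)
        have := h j hji
        rwa [hjc] at this
      · left; exact hle

-- the greedy loop of A, run from position a, emits exactly the cut-point slices of B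
theorem pvLoopA_eq (s : String) (d : PySem.Dict Char Int) (p : Int → Bool)
    (hL : ∀ k : Nat, k < s.toList.length →
      (k : Int) ≤ d.getD (s.toList.getD k ' ') 0)
    (hp : ∀ i : Nat, i < s.toList.length →
      (p i = true ↔ ∀ k : Nat, k ≤ i → d.getD (s.toList.getD k ' ') 0 ≤ (i : Int))) :
    ∀ (cnt a : Nat), a + cnt = s.toList.length →
    ∀ (e start : Int) (res : List Int) (out : List String),
      0 ≤ e →
      (∀ k : Nat, k < a → d.getD (s.toList.getD k ' ') 0 ≤ e) →
      (e = 0 ∨ ∃ k : Nat, k < a ∧ e = d.getD (s.toList.getD k ' ') 0) →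
      ((PySem.List.pyRange a (s.toList.length : Int) 1).foldl (pvBodyA s d)
          (start, res, out, e)).2.2.1
        = out ++ pvEmit s start (((PySem.List.pyRange a (s.toList.length : Int) 1)).filter p) := by
  intro cnt
  induction cnt with
  | zero =>
    intro a ha e start res out _ _ _
    rw [PySem.List.pyRange_one_eq_nil (by omega)]
    simp [pvEmit_nil]
  | succ cnt ih =>
    intro a ha e start res out he hub hwit
    have han : (a : Int) < (s.toList.length : Int) := by omega
    have haN : a < s.toList.length := by omega
    rw [PySem.List.pyRange_one_cons han]
    have hget : ((PySem.Str.pyGet? s (a : Int)).getD ' ') = s.toList.getD a ' ' := by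
      rw [PySem.Str.pyGet?_natCast, List.getD_eq_getElem?_getD]
    have hcast : ((a : Int) + 1) = ((a + 1 : Nat) : Int) := by push_cast; ring
    set La := d.getD (s.toList.getD a ' ') 0 with hLa
    have hLaa : (a : Int) ≤ La := hL a haN
    rw [List.foldl_cons, List.filter_cons]
    by_cases hcut : (a : Int) = max e La
    · -- cut at a
      have hpa : p (a : Int) = true := by
        rw [hp a haN]
        intro k hk
        rcases Nat.lt_or_ge k a with hka | hka
        · exact le_trans (hub k hka) (by omega)
        · have : k = a := by omega
          subst this; omega
      have hstep : pvBodyA s d (start, res, out, e) (a : Int)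
          = ((a : Int) + 1, res ++ [(a : Int) - start + 1],
             out ++ [PySem.Str.slice s (some start) (some ((a : Int) + 1))], max e La) := by
        simp only [pvBodyA, hget, ← hLa, ← hcut]
        rw [if_pos (by simp)]
      rw [hstep, hpa]
      simp only [if_true]
      have ihres := ih (a + 1) (by omega) (max e La) ((a : Int) + 1)
        (res ++ [(a : Int) - start + 1])
        (out ++ [PySem.Str.slice s (some start) (some ((a : Int) + 1))])
        (by omega)
        (by intro k hk
            rcases Nat.lt_or_ge k a with hka | hka
            · exact le_trans (hub k hka) (le_max_left _ _)
            · have : k = a := by omega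
              subst this; exact le_max_right _ _)
        (by rcases max_choice e La with hm | hm
            · rw [hm]
              rcases hwit with h0 | ⟨k, hk, hke⟩
              · exact Or.inl h0
              · exact Or.inr ⟨k, by omega, hke⟩
            · exact Or.inr ⟨a, by omega, by rw [hm]⟩)
      push_cast at ihres ⊢
      rw [pvEmit_cons, ihres]
      simp
    · -- no cut at a
      have hgt : (a : Int) < max e La := lt_of_le_of_ne (le_trans hLaa (le_max_right _ _)) hcut
      have hpa : p (a : Int) = false := by
        rw [← Bool.not_eq_true, hp a haN]
        intro hall
        rcases max_choice e La with hm | hm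
        · rw [hm] at hgt
          rcases hwit with h0 | ⟨k, hk, hke⟩
          · omega
          · have := hall k (by omega)
            omega
        · have := hall a (le_refl a)
          rw [hm] at hgt
          omega
      have hstep : pvBodyA s d (start, res, out, e) (a : Int)
          = (start, res, out, max e La) := by
        simp only [pvBodyA, hget, ← hLa]
        rw [if_neg (by simp; omega)]
      rw [hstep, hpa]
      simp only [Bool.false_eq_true, if_false]
      have ihres := ih (a + 1) (by omega) (max e La) start res out
        (by omega)
        (by intro k hk
            rcases Nat.lt_or_ge k a with hka | hka
            · exact le_trans (hub k hka) (le_max_left _ _)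
            · have : k = a := by omega
              subst this; exact le_max_right _ _)
        (by rcases max_choice e La with hm | hm
            · rw [hm]
              rcases hwit with h0 | ⟨k, hk, hke⟩
              · exact Or.inl h0
              · exact Or.inr ⟨k, by omega, hke⟩
            · exact Or.inr ⟨a, by omega, by rw [hm]⟩)
      push_cast at ihres ⊢
      exact ihres

-- ===== VERDICT (by name: the statement is the Claim_ definition above) =====
theorem partitionLevels_spec : Claim_equal_partitionLevels := by
  intro s _
  unfold Spec_partitionLevels
  simp only [partitionLevels, partitionLevels_alt]
  rw [pvDictA_eq]
  rw [show (PySem.List.enumerate s.toList 0).foldl pvStepB (PySem.Dict.empty, PySem.Dict.empty)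
        = (pvFirstF s.toList 0 PySem.Dict.empty, pvLastF s.toList 0 PySem.Dict.empty) from
      pvStepB_split _ _ _]
  rw [PySem.Str.len_eq]
  have hmain := pvLoopA_eq s (pvLastF s.toList 0 PySem.Dict.empty)
    (fun i => (((pvFirstF s.toList 0 PySem.Dict.empty).keys.map
        (fun c => ((pvFirstF s.toList 0 PySem.Dict.empty).getD c 0,
                   (pvLastF s.toList 0 PySem.Dict.empty).getD c 0))).all
      (fun p => !(decide (p.1 ≤ i)) || decide (p.2 ≤ i))))
    (by intro k hk
        have := pvLastF_ge s.toList 0 PySem.Dict.empty k hk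
        omega)
    (by intro i hi
        exact pvCond_iff s.toList i hi)
    s.toList.length 0 (by omega) 0 0 [] []
    (le_refl 0)
    (by intro k hk; omega)
    (Or.inl rfl)
  simp only [Nat.cast_zero] at hmain
  rw [hmain]
  rfl
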